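-- pv_equiv track=rewrite | github.com/andremargarin/digital-asset-management-api | assets/utils.py | generate_time_frames
-- ===== SOURCE A (Python) =====
-- def generate_time_frames(clip_duration, frame_size):
--     if (clip_duration % frame_size == 0):
--         nparts = int(clip_duration / frame_size)
--     else:
--         nparts = int(clip_duration / frame_size) + 1
--
--     breakpoints = [
--         i * frame_size if i * frame_size < clip_duration else clip_duration
--         for i in range(0, nparts + 1)
--     ]
--
--     time_frames = []
--     for i in range(nparts):
--         time_frame = (breakpoints[i], breakpoints[i+1])
--         time_frames.append(time_frame)
--
--     return time_frames
-- ===== SOURCE B (Python) =====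
-- def generate_time_frames(clip_duration, frame_size):
--     # walk the frame starts directly with a stepped range: no part count, no division
--     return [(min(s, clip_duration), min(s + frame_size, clip_duration))
--             for s in range(0, clip_duration, frame_size)]
-- ===== Notes on version B (the rewrite author's own statement) =====
-- stated objective: simpler
-- what changed: B drops the ceil-division part count, the breakpoints table and the pairing pass entirely: it steps a range(0, clip_duration, frame_size) over the frame starts and emits (min(s, clip), min(s+frame, clip)) per start.
-- intended difference: On mixed-sign inputs with 0 < |clip_duration| < |frame_size| (e.g. clip=1, frame=-2) A's trunc-division part count overshoots ceil by one and A returns a single degenerate frame like [(0, -2)] lying outside the clip; B returns [], the intended empty partition. — e.g. on generate_time_frames(1, -2): A returns [(0, -2)], B returns []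
import Mathlib
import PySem

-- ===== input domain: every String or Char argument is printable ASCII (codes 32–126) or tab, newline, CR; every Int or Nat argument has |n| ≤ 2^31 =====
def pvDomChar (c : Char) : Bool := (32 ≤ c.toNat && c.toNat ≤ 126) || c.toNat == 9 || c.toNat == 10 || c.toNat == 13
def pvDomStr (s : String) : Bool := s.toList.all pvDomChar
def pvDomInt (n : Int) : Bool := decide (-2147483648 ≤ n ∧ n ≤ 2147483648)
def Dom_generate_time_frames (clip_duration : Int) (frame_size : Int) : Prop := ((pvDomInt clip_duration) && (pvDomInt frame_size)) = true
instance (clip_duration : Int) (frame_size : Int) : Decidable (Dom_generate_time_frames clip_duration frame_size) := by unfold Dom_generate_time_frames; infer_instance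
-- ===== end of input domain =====

-- B replaces A's ceil-division part count + breakpoints table + pairing pass with a single
-- stepped range over the frame starts (simpler). Return values only; no mutation involved.


-- ===== PORT A =====
-- int(clip_duration / frame_size) = PySem.Int.truncdiv (exact: |args| ≤ 2^31 < 2^53);
-- breakpoints[i] via pyGetD (the loop only reads indices 0..nparts, all in range for the length-(nparts+1) list)
def generate_time_frames (clip_duration : Int) (frame_size : Int) : List (Int × Int) :=
  let nparts : Int :=
    if PySem.Int.mod clip_duration frame_size = 0 then
      PySem.Int.truncdiv clip_duration frame_size
    else
      PySem.Int.truncdiv clip_duration frame_size + 1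
  let breakpoints : List Int :=
    (PySem.List.pyRange 0 (nparts + 1) 1).map
      (fun i => if i * frame_size < clip_duration then i * frame_size else clip_duration)
  (PySem.List.pyRange 0 nparts 1).foldl
    (fun time_frames i =>
      time_frames ++ [(PySem.List.pyGetD breakpoints i 0, PySem.List.pyGetD breakpoints (i + 1) 0)])
    []

-- ===== PORT B =====
def generate_time_frames_alt (clip_duration : Int) (frame_size : Int) : List (Int × Int) :=
  (PySem.List.pyRange 0 clip_duration frame_size).map
    (fun s => (min s clip_duration, min (s + frame_size) clip_duration))

-- ===== PRECONDITION & SPEC =====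
-- Python raises on frame_size = 0 (A: ZeroDivisionError, B: ValueError from range); excluded.
def Pre_generate_time_frames (clip_duration : Int) (frame_size : Int) : Prop := frame_size ≠ 0
instance (clip_duration : Int) (frame_size : Int) : Decidable (Pre_generate_time_frames clip_duration frame_size) := by unfold Pre_generate_time_frames; infer_instance

def pvWitness_generate_time_frames : Int × Int := (10, 3)

-- On mixed-sign inputs with 0 < |clip_duration| < |frame_size| A's trunc-division part count
-- overshoots ceil by one and A returns one degenerate frame lying outside the clip
-- (e.g. [(0, -2)] for clip=1, frame=-2); B returns [], the intended empty partition.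
def D_generate_time_frames (clip_duration : Int) (frame_size : Int) : Prop :=
  (clip_duration < 0 ∧ 0 < frame_size ∧ -clip_duration < frame_size) ∨
  (frame_size < 0 ∧ 0 < clip_duration ∧ clip_duration < -frame_size)
instance (clip_duration : Int) (frame_size : Int) : Decidable (D_generate_time_frames clip_duration frame_size) := by unfold D_generate_time_frames; infer_instance

def Spec_generate_time_frames (clip_duration : Int) (frame_size : Int) (out : List (Int × Int)) : Prop := ¬ D_generate_time_frames clip_duration frame_size → out = generate_time_frames_alt clip_duration frame_size
instance (clip_duration : Int) (frame_size : Int) (out : List (Int × Int)) : Decidable (Spec_generate_time_frames clip_duration frame_size out) := by unfold Spec_generate_time_frames; infer_instance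

def pvDiffWitness_generate_time_frames : Int × Int := (1, -2)
def pvDiffWitnessOut_generate_time_frames : (List (Int × Int)) × (List (Int × Int)) := ([(0, -2)], [])

-- ===== CLAIM (what is proved, stated in full; the proofs are below) =====
def Claim_unchanged_generate_time_frames : Prop := ∀ (clip_duration : Int) (frame_size : Int), Dom_generate_time_frames clip_duration frame_size → Pre_generate_time_frames clip_duration frame_size → Spec_generate_time_frames clip_duration frame_size (generate_time_frames clip_duration frame_size)
def Claim_changed_generate_time_frames : Prop := Dom_generate_time_frames (pvDiffWitness_generate_time_frames.1) (pvDiffWitness_generate_time_frames.2) ∧ Pre_generate_time_frames (pvDiffWitness_generate_time_frames.1) (pvDiffWitness_generate_time_frames.2) ∧ D_generate_time_frames (pvDiffWitness_generate_time_frames.1) (pvDiffWitness_generate_time_frames.2) ∧ generate_time_frames (pvDiffWitness_generate_time_frames.1) (pvDiffWitness_generate_time_frames.2) = pvDiffWitnessOut_generate_time_frames.1 ∧ generate_time_frames_alt (pvDiffWitness_generate_time_frames.1) (pvDiffWitness_generate_time_frames.2) = pvDiffWitnessOut_generate_time_frames.2 ∧ pvDiffWitnessOut_generate_time_frames.1 ≠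 pvDiffWitnessOut_generate_time_frames.2
def Claim_exact_generate_time_frames : Prop := ∀ (clip_duration : Int) (frame_size : Int), Dom_generate_time_frames clip_duration frame_size → Pre_generate_time_frames clip_duration frame_size → D_generate_time_frames clip_duration frame_size → generate_time_frames clip_duration frame_size ≠ generate_time_frames_alt clip_duration frame_size


-- ===== LEMMAS AND PROOFS =====

-- evaluate a Euclidean division from a bracketing (positive divisor)
theorem pvEdivEq (a b q : Int) (hb : 0 < b) (h1 : b*q ≤ a) (h2 : a < b*q + b) : a / b = q := by
  have key : a / b = (a - b*q + b*q) / b := by ring_nf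
  rw [key, Int.add_mul_ediv_left _ _ (ne_of_gt hb), Int.ediv_eq_zero_of_lt (by linarith) (by linarith)]
  ring

theorem pvOneLeEdiv (a b : Int) (hb : 0 < b) (h : b ≤ a) : 1 ≤ a / b := by
  have key : a / b = (a - b + b*1) / b := by ring_nf
  rw [key, Int.add_mul_ediv_left _ _ (ne_of_gt hb)]
  have := Int.ediv_nonneg (a := a - b) (b := b) (by linarith) (by linarith)
  omega

-- ceiling count of a positive-step range out of floor division and divisibility
theorem pvCeilCount (c f : Int) (hc : 0 < c) (hf : 0 < f) :
    (c + f - 1) / f = c / f + (if f ∣ c then 0 else 1) := by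
  have hq := Int.ediv_add_emod c f
  have hr0 := Int.emod_nonneg c (ne_of_gt hf)
  have hrf := Int.emod_lt_of_pos c hf
  by_cases hd : f ∣ c
  · have hr : c % f = 0 := Int.emod_eq_zero_of_dvd hd
    rw [if_pos hd, pvEdivEq (c + f - 1) f (c / f) hf (by linarith) (by linarith)]
    ring
  · have hr : 0 < c % f := lt_of_le_of_ne hr0 (fun h => hd (Int.dvd_of_emod_eq_zero h.symm))
    have hx : f * (c / f + 1) = f * (c / f) + f := by ring
    rw [if_neg hd, pvEdivEq (c + f - 1) f (c / f + 1) hf (by rw [hx]; linarith) (by rw [hx]; linarith)]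

-- A's part count as reductions of truncdiv to Euclidean division on nonnegative numerators
theorem pvTdivNonneg (a b : Int) (ha : 0 ≤ a) : PySem.Int.truncdiv a b = a / b := by
  unfold PySem.Int.truncdiv
  rw [Int.tdiv_eq_ediv, if_pos (Or.inl ha)]
  ring

theorem pvTdivNegPos (c f : Int) (hc : c < 0) : PySem.Int.truncdiv c f = -((-c) / f) := by
  unfold PySem.Int.truncdiv
  have h1 : c.tdiv f = -((-c).tdiv f) := by rw [← Int.neg_tdiv]; simp
  rw [h1, Int.tdiv_eq_ediv, if_pos (Or.inl (show (0:ℤ) ≤ -c by omega))]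
  ring

theorem pvTdivPosNeg (c f : Int) (hf : f < 0) (hc : 0 ≤ c) : PySem.Int.truncdiv c f = -(c / (-f)) := by
  unfold PySem.Int.truncdiv
  have h1 : c.tdiv f = -(c.tdiv (-f)) := by rw [← Int.tdiv_neg]; simp
  rw [h1, Int.tdiv_eq_ediv, if_pos (Or.inl hc)]
  ring

theorem pvTdivNegNeg (c f : Int) (hc : c < 0) (hf : f < 0) :
    PySem.Int.truncdiv c f = (-c) / (-f) := by
  unfold PySem.Int.truncdiv
  have h1 : c.tdiv f = (-c).tdiv (-f) := by rw [Int.neg_tdiv, Int.tdiv_neg]; ring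
  rw [h1, Int.tdiv_eq_ediv, if_pos (Or.inl (show (0:ℤ) ≤ -c by omega))]
  ring

-- A with the breakpoints lookups resolved: a map over range(nparts)
theorem pvAAsMap (c f : Int) :
    generate_time_frames c f =
      (PySem.List.pyRange 0 (if PySem.Int.mod c f = 0 then PySem.Int.truncdiv c f else PySem.Int.truncdiv c f + 1) 1).map
        (fun i => ((if i * f < c then i * f else c), (if (i + 1) * f < c then (i + 1) * f else c))) := by
  unfold generate_time_frames
  rw [PySem.List.foldl_append_singleton_eq_map]
  simp only [List.nil_append]
  refine List.map_congr_left ?_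
  intro i hi
  rw [PySem.List.mem_pyRange_one] at hi
  rw [PySem.List.pyGetD_map_pyRange_of_nonneg _ _ _ _ hi.1 (by omega),
      PySem.List.pyGetD_map_pyRange_of_nonneg _ _ _ _ (by omega) (by omega)]

-- pointwise agreement of the two frame formulas
theorem pvPointEq (c f : Int) (k : Nat) :
    ((if ((0:Int) + (k:Int)) * f < c then ((0:Int) + (k:Int)) * f else c),
     (if (((0:Int) + (k:Int)) + 1) * f < c then (((0:Int) + (k:Int)) + 1) * f else c))
    = (min ((0:Int) + f * (k:Int)) c, min (((0:Int) + f * (k:Int)) + f) c) := by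
  have h1 : ((0:Int) + (k:Int)) * f = (0:Int) + f * (k:Int) := by ring
  have h2 : (((0:Int) + (k:Int)) + 1) * f = ((0:Int) + f * (k:Int)) + f := by ring
  rw [h1, h2]
  generalize (0:Int) + f * (k:Int) = x
  simp only [min_def, Prod.mk.injEq]
  constructor <;> (split_ifs <;> omega)

-- the two counts agree outside the change region
theorem pvCountEq (c f : Int) (hf : f ≠ 0) (hD : ¬ D_generate_time_frames c f) :
    ((if PySem.Int.mod c f = 0 then PySem.Int.truncdiv c f else PySem.Int.truncdiv c f + 1) - 0).toNat
    = (if 0 < f then (if (0:Int) < c then ((c - 0 + f - 1) / f).toNat else 0)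
       else (if c < (0:Int) then ((0 - c + -f - 1) / -f).toNat else 0)) := by
  unfold D_generate_time_frames at hD
  push_neg at hD
  simp only [PySem.Int.mod_eq_zero_iff_dvd]
  rcases lt_trichotomy f 0 with hfneg | hf0 | hfpos
  · rw [if_neg (show ¬ (0:Int) < f by omega)]
    rcases lt_trichotomy c 0 with hcneg | hc0 | hcpos
    · -- c < 0, f < 0 : both counts are the positive ceiling
      rw [if_pos (show c < (0:Int) by omega), pvTdivNegNeg c f hcneg hfneg]
      have heq : (0 - c + -f - 1) / -f = (-c) / (-f) + (if (-f) ∣ (-c) then 0 else 1) := by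
        have h := pvCeilCount (-c) (-f) (by omega) (by omega)
        rw [show (0 - c + -f - 1) = (-c) + (-f) - 1 by ring, h]
      rw [heq]
      have hnn : 0 ≤ (-c) / (-f) := Int.ediv_nonneg (by omega) (by omega)
      have hdd : ((-f) ∣ (-c)) ↔ (f ∣ c) := by simp [neg_dvd, dvd_neg]
      by_cases hd : f ∣ c
      · rw [if_pos hd, if_pos (hdd.mpr hd)]; omega
      · rw [if_neg hd, if_neg (fun h => hd (hdd.mp h))]; omega
    · -- c = 0 : both empty
      subst hc0
      rw [if_neg (show ¬ (0:Int) < (0:Int) by omega), if_pos (dvd_zero f)]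
      simp [PySem.Int.truncdiv, Int.zero_tdiv]
    · -- f < 0 < c, outside D so -f ≤ c : A's count is nonpositive, both empty
      rw [if_neg (show ¬ c < (0:Int) by omega)]
      have hge : -f ≤ c := hD.2 hfneg hcpos
      rw [pvTdivPosNeg c f hfneg (le_of_lt hcpos)]
      by_cases hd : f ∣ c
      · rw [if_pos hd]
        have := Int.ediv_nonneg (a := c) (b := -f) (by omega) (by omega)
        omega
      · rw [if_neg hd]
        have := pvOneLeEdiv c (-f) (by omega) hge
        omega
  · omega
  · rw [if_pos (show (0:Int) < f by omega)]
    rcases lt_trichotomy c 0 with hcneg | hc0 | hcpos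
    · -- c < 0 < f, outside D so f ≤ -c : A's count is nonpositive, both empty
      rw [if_neg (show ¬ (0:Int) < c by omega)]
      have hge : f ≤ -c := hD.1 hcneg hfpos
      rw [pvTdivNegPos c f hcneg]
      by_cases hd : f ∣ c
      · rw [if_pos hd]
        have := Int.ediv_nonneg (a := -c) (b := f) (by omega) (by omega)
        omega
      · rw [if_neg hd]
        have := pvOneLeEdiv (-c) f (by omega) hge
        omega
    · subst hc0
      rw [if_neg (show ¬ (0:Int) < (0:Int) by omega), if_pos (dvd_zero f)]
      simp [PySem.Int.truncdiv, Int.zero_tdiv]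
    · -- 0 < c, 0 < f : the ordinary ceiling
      rw [if_pos (show (0:Int) < c by omega), pvTdivNonneg c f (le_of_lt hcpos)]
      have heq : (c - 0 + f - 1) / f = c / f + (if f ∣ c then 0 else 1) := by
        rw [show (c - 0 + f - 1) = c + f - 1 by ring]
        exact pvCeilCount c f hcpos hfpos
      rw [heq]
      have hnn : 0 ≤ c / f := Int.ediv_nonneg (by omega) (by omega)
      by_cases hd : f ∣ c
      · rw [if_pos hd, if_pos hd]; omega
      · rw [if_neg hd, if_neg hd]; omega

-- ===== VERDICT (by name: the statements are the Claim_ definitions above) =====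
theorem generate_time_frames_spec : Claim_unchanged_generate_time_frames := by
  intro c f hDom hPre hnD
  rw [pvAAsMap, PySem.List.pyRange_one]
  unfold generate_time_frames_alt PySem.List.pyRange
  rw [if_neg hPre]
  simp only [List.map_map]
  rw [← pvCountEq c f hPre hnD]
  refine List.map_congr_left ?_
  intro k _
  simpa using pvPointEq c f k

theorem generate_time_frames_changed : Claim_changed_generate_time_frames := by
  unfold Claim_changed_generate_time_frames; decide

theorem generate_time_frames_tight : Claim_exact_generate_time_frames := by
  intro c f hDom hPre hD
  have hB : generate_time_frames_alt c f = [] := by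
    unfold generate_time_frames_alt PySem.List.pyRange
    rw [if_neg hPre]
    rcases hD with ⟨hc, hf, _⟩ | ⟨hf, hc, _⟩
    · simp [hf, not_lt.mpr (le_of_lt hc)]
    · simp [not_lt.mpr (le_of_lt hf)]
      exact fun h => absurd h (by omega)
  have hN : (if PySem.Int.mod c f = 0 then PySem.Int.truncdiv c f else PySem.Int.truncdiv c f + 1) = 1 := by
    rcases hD with ⟨hc, hf, hlt⟩ | ⟨hf, hc, hlt⟩
    · have hnd : ¬ f ∣ c := by
        intro hdvd
        have : f ∣ -c := dvd_neg.mpr hdvd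
        have := Int.le_of_dvd (by omega) this
        omega
      rw [if_neg (fun h => hnd ((PySem.Int.mod_eq_zero_iff_dvd c f).mp h))]
      rw [pvTdivNegPos c f hc, Int.ediv_eq_zero_of_lt (by omega) (by omega)]
      ring
    · have hnd : ¬ f ∣ c := by
        intro hdvd
        have : -f ∣ c := neg_dvd.mpr hdvd
        have := Int.le_of_dvd (by omega) this
        omega
      rw [if_neg (fun h => hnd ((PySem.Int.mod_eq_zero_iff_dvd c f).mp h))]
      rw [pvTdivPosNeg c f hf (by omega), Int.ediv_eq_zero_of_lt (by omega) (by omega)]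
      ring
  rw [pvAAsMap, hN, hB]
  simp [PySem.List.pyRange_one]
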